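-- pv_equiv track=rewrite | github.com/MaxGonchar/some_programs | numb_to_numb.py | comb_numb
-- ===== SOURCE A (Python) =====
-- def shift(n: int, arr: list) -> list:
--     c = [arr[0]] * n
--     rez = [[arr[0]] * n]
--     while c != [arr[-1]] * n:
--         i = -1
--         while True:
--             if c[i] != arr[-1]:
--                 c[i] = arr[arr.index(c[i]) + 1]
--                 break
--             else:
--                 c[i] = arr[0]
--                 i -= 1
--         rez.append(c.copy())
--     return rez
--
-- def comb_numb(numb: str) -> list:
--     # get variants of combinations number's digits,
--     # where ',' will divide number's groups
--     comb_var = shift(len(numb) - 1, [[','], []])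
--     rez = []
--     numbs = [[n] for n in list(numb)]
--     # divide 'numb' by digits's groups according to scheme from 'comb_var'
--     for var in comb_var:
--         var = var + [[]]
--         subrez = []
--         for el in list(map(list, zip(numbs, var))):
--             subrez += el[0] + el[1]
--         rez.append(''.join(subrez).split(','))
--     rez.remove([numb])  # delete 'numb' self from sequence
--     return rez
-- ===== SOURCE B (Python) =====
-- def comb_numb(numb: str) -> list:
--     # Recursive gap enumeration: at each gap between characters, first take the
--     # 'comma' branch, then the 'no comma' branch, accumulating groups directly.
--     # The all-no-comma leaf (no group boundary ever emitted) is skipped, which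
--     # is exactly the [numb] entry the original deletes.
--     def go(s: str, cur: str, groups: list) -> list:
--         if not s:
--             return [groups + [cur]] if groups else []
--         c2 = cur + s[0]
--         rest = go(s[1:], c2, groups)
--         if len(s) > 1:
--             return go(s[1:], '', groups + [c2]) + rest
--         return rest
--     return go(numb, '', [])
-- ===== Notes on version B (the rewrite author's own statement) =====
-- stated objective: simpler
-- what changed: B replaces A's generic binary odometer (shift) plus per-variant string re-joining and re-splitting with one direct recursion over the gaps between characters that accumulates the digit groups as it goes and simply skips the no-comma leaf, so the rez.remove pass disappears.
-- outside the precondition, e.g. on comb_numb(','): A raises ValueError, B returns []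
import Mathlib
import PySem

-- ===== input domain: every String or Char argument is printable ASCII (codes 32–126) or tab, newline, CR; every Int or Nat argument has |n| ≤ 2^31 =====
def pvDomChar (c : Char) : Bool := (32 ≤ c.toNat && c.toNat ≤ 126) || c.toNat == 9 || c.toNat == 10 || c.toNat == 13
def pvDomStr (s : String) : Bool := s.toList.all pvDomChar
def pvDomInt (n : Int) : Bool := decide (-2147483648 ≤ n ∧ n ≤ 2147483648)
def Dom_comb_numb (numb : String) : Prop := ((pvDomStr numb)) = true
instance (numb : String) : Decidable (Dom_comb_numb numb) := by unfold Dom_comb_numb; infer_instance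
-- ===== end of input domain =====

-- B replaces A's hand-rolled binary odometer + string re-splitting with a direct
-- recursive enumeration of the gaps, building the digit groups as it goes (objective: simpler).
-- A raises ValueError when the input contains ',' (its rez.remove([numb]) finds no match);
-- exactly those inputs are outside Pre_.

-- ===== PORT A =====
-- while True inner loop of shift: fuel-bounded (fuel only makes the loop total; proven sufficient)
def pvShiftInner (arr : List (List String)) : Nat → List (List String) → Int → List (List String)
  | 0, c, _ => c
  | fuel+1, c, i =>
    if PySem.List.pyGetD c i [] ≠ PySem.List.pyGetD arr (-1) [] then
      PySem.List.pySetD c i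
        (PySem.List.pyGetD arr ((((PySem.List.index? arr (PySem.List.pyGetD c i [])).getD 0 + 1 : Nat) : Int)) [])
    else
      pvShiftInner arr fuel (PySem.List.pySetD c i (PySem.List.pyGetD arr 0 [])) (i - 1)

-- outer while loop of shift: fuel-bounded (2^n iterations suffice, proven below)
def pvShiftOuter (arr : List (List String)) (n : Int) :
    Nat → List (List String) → List (List (List String)) → List (List (List String))
  | 0, _, rez => rez
  | fuel+1, c, rez =>
    if c = PySem.List.pyRepeat [PySem.List.pyGetD arr (-1) []] n then rez
    else
      let c' := pvShiftInner arr (c.length + 1) c (-1)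
      pvShiftOuter arr n fuel c' (rez ++ [c'])

def pvShift (n : Int) (arr : List (List String)) : List (List (List String)) :=
  let c := PySem.List.pyRepeat [PySem.List.pyGetD arr 0 []] n
  pvShiftOuter arr n (2 ^ n.toNat) c [c]

def comb_numb (numb : String) : List (List String) :=
  let comb_var := pvShift (PySem.Str.len numb - 1) [[","], []]
  let numbs : List (List String) := numb.toList.map (fun ch => [String.ofList [ch]])
  let rez := comb_var.foldl (fun rez var =>
    let var' := var ++ [[]]
    let subrez := (numbs.zip var').foldl (fun sub el => sub ++ el.1 ++ el.2) ([] : List String)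
    rez ++ [(PySem.Str.split? (PySem.Str.join "" subrez) ",").getD []]) []
  -- rez.remove([numb]) raises ValueError when [numb] is absent; such inputs are outside Pre_
  (PySem.List.remove? rez [numb]).getD rez

-- ===== PORT B =====
def pvGoB : List Char → List Char → List String → List (List String)
  | [], cur, groups => if groups.isEmpty then [] else [groups ++ [String.ofList cur]]
  | c :: s, cur, groups =>
    let c2 := cur ++ [c]
    let rest := pvGoB s c2 groups
    if s.isEmpty then rest
    else pvGoB s [] (groups ++ [String.ofList c2]) ++ rest

def comb_numb_alt (numb : String) : List (List String) := pvGoB numb.toList [] []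

-- ===== PRECONDITION & SPEC =====
-- Pre_ excludes exactly the inputs containing ',', on which A's rez.remove([numb]) raises ValueError.
def Pre_comb_numb (numb : String) : Prop := ',' ∉ numb.toList
instance (numb : String) : Decidable (Pre_comb_numb numb) := by unfold Pre_comb_numb; infer_instance
def pvWitness_comb_numb : String := "12"

def Spec_comb_numb (numb : String) (out : List (List String)) : Prop := out = comb_numb_alt numb
instance (numb : String) (out : List (List String)) : Decidable (Spec_comb_numb numb out) := by unfold Spec_comb_numb; infer_instance

-- ===== CLAIM (what is proved, stated in full; the proofs are below) =====
def Claim_equal_comb_numb : Prop := ∀ (numb : String), Dom_comb_numb numb → Pre_comb_numb numb → Spec_comb_numb numb (comb_numb numb)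

-- ===== LEMMAS AND PROOFS =====

-- the two digits of A's odometer
def pvA : List String := [","]
def pvB : List String := ([] : List String)
def pvArr : List (List String) := [[","], []]

def pvOkR (r : List (List String)) : Prop := ∀ d ∈ r, d = pvA ∨ d = pvB

-- little-endian value of a reversed odometer state
def pvValR : List (List String) → Nat
  | [] => 0
  | d :: t => (if d = pvB then 1 else 0) + 2 * pvValR t

-- little-endian digits of k (length n)
def pvBitsR : Nat → Nat → List (List String)
  | 0, _ => []
  | n+1, k => (if k % 2 = 1 then pvB else pvA) :: pvBitsR n (k / 2)

-- little-endian increment (on reversed states)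
def pvIncLE : List (List String) → List (List String)
  | [] => []
  | d :: t => if d = pvB then pvA :: pvIncLE t else pvB :: t

-- result of the inner loop, recursing over the reversed not-yet-scanned part
def pvBumpR : List (List String) → Nat → List (List String)
  | [], j => List.replicate j pvA
  | d :: rv, j => if d = pvB then pvBumpR rv (j+1) else rv.reverse ++ pvB :: List.replicate j pvA

-- Bool patterns, most significant gap first; false = comma
def pvVlist : Nat → List (List Bool)
  | 0 => [[]]
  | n+1 => (pvVlist n).map (false :: ·) ++ (pvVlist n).map (true :: ·)

def pvFront : Nat → List (List Bool)
  | 0 => []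
  | n+1 => (pvVlist n).map (false :: ·) ++ (pvFront n).map (true :: ·)

def pvDig (q : Bool) : List String := if q then [] else [","]

-- the joined character string A builds for pattern p
def pvInter : List Char → List Bool → List Char
  | [], _ => []
  | c :: rest, [] => c :: pvInter rest []
  | c :: rest, q :: p => c :: ((if q then [] else [',']) ++ pvInter rest p)

-- str.split(',') as a structural recursion
def pvPieces : List Char → List Char → List (List Char)
  | pre, [] => [pre]
  | pre, c :: rest => if c = ',' then pre :: pvPieces [] rest else pvPieces (pre ++ [c]) rest

-- the group list for pattern p (B's leaf value)
def pvBuildC : List Char → List Bool → List Char → List String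
  | [], _, cur => [String.ofList cur]
  | c :: rest, [], cur => pvBuildC rest [] (cur ++ [c])
  | c :: rest, q :: p, cur =>
    if q then pvBuildC rest p (cur ++ [c]) else String.ofList (cur ++ [c]) :: pvBuildC rest p []

theorem pvAneB : pvA ≠ pvB := by decide

theorem pvValR_lt (r : List (List String)) : pvValR r < 2 ^ r.length := by
  induction r with
  | nil => simp [pvValR]
  | cons d t ih => simp only [pvValR, List.length_cons, pow_succ]; split <;> omega

theorem pvValR_repl (m : Nat) : pvValR (List.replicate m pvB) = 2 ^ m - 1 := by
  induction m with
  | zero => simp [pvValR]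
  | succ m ih =>
    have h1 : (1:Nat) ≤ 2 ^ m := Nat.one_le_two_pow
    simp [List.replicate_succ, pvValR, ih, pow_succ]; omega

theorem pvValR_replA (m : Nat) : pvValR (List.replicate m pvA) = 0 := by
  induction m with
  | zero => rfl
  | succ m ih => simp [List.replicate_succ, pvValR, ih, pvAneB]

theorem pvOkR_cons {d : List String} {t : List (List String)} :
    pvOkR (d :: t) ↔ (d = pvA ∨ d = pvB) ∧ pvOkR t := by
  constructor
  · intro h; exact ⟨h d (by simp), fun x hx => h x (by simp [hx])⟩
  · rintro ⟨h1, h2⟩ x hx; rcases List.mem_cons.mp hx with h | h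
    · exact h ▸ h1
    · exact h2 x h

theorem pvBitsR_valR (r : List (List String)) (h : pvOkR r) :
    pvBitsR r.length (pvValR r) = r := by
  induction r with
  | nil => rfl
  | cons d t ih =>
    rcases (pvOkR_cons.mp h) with ⟨hd, ht⟩
    rcases hd with hd | hd <;> subst hd <;>
      simp [pvBitsR, pvValR, pvAneB, Nat.add_mul_div_left, ih ht]

theorem pvIncLE_spec (r : List (List String)) (h : pvOkR r)
    (hne : r ≠ List.replicate r.length pvB) :
    pvValR (pvIncLE r) = pvValR r + 1 ∧ (pvIncLE r).length = r.length ∧ pvOkR (pvIncLE r) := by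
  induction r with
  | nil => simp at hne
  | cons d t ih =>
    rcases (pvOkR_cons.mp h) with ⟨hd, ht⟩
    rcases hd with hd | hd <;> subst hd
    · have e : pvIncLE (pvA :: t) = pvB :: t := by
        simp only [pvIncLE]; rw [if_neg pvAneB]
      refine ⟨?_, ?_, ?_⟩ <;> rw [e]
      · simp [pvValR, pvAneB]; omega
      · rfl
      · exact pvOkR_cons.mpr ⟨Or.inr rfl, ht⟩
    · have htne : t ≠ List.replicate t.length pvB := by
        intro hh; apply hne
        rw [List.length_cons, List.replicate_succ]
        exact congrArg (List.cons pvB) hh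
      obtain ⟨h1, h2, h3⟩ := ih ht htne
      have e : pvIncLE (pvB :: t) = pvA :: pvIncLE t := by
        simp [pvIncLE]
      refine ⟨?_, ?_, ?_⟩ <;> rw [e]
      · simp [pvValR, pvAneB, h1]; omega
      · simp [h2]
      · exact pvOkR_cons.mpr ⟨Or.inl rfl, h3⟩

theorem pvOkR_ne_repl_iff (r : List (List String)) (h : pvOkR r) :
    r ≠ List.replicate r.length pvB ↔ pvA ∈ r := by
  induction r with
  | nil => simp
  | cons d t ih =>
    rcases (pvOkR_cons.mp h) with ⟨hd, ht⟩
    rcases hd with hd | hd <;> subst hd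
    · constructor
      · intro _; exact List.mem_cons_self
      · intro _ hh
        rw [List.length_cons, List.replicate_succ] at hh
        exact pvAneB (List.cons_eq_cons.mp hh).1
    · constructor
      · intro hh
        have ht2 : t ≠ List.replicate t.length pvB := by
          intro h2; apply hh
          rw [List.length_cons, List.replicate_succ]
          exact congrArg (List.cons pvB) h2
        exact List.mem_cons_of_mem _ ((ih ht).mp ht2)
      · intro hh h2
        rw [List.length_cons, List.replicate_succ] at h2
        have h3 : t = List.replicate t.length pvB := (List.cons_eq_cons.mp h2).2
        rcases List.mem_cons.mp hh with h4 | h4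
        · exact pvAneB h4
        · exact (ih ht).mpr h4 h3

-- pvBumpR computes the little-endian increment of the original state
theorem pvBumpR_incLE (rv : List (List String)) (j : Nat) (hA : pvA ∈ rv) :
    (pvBumpR rv j).reverse = pvIncLE (List.replicate j pvB ++ rv) := by
  induction rv generalizing j with
  | nil => simp at hA
  | cons d rv ih =>
    by_cases hd : d = pvB
    · subst hd
      have hA' : pvA ∈ rv := by
        rcases List.mem_cons.mp hA with h | h
        · exact absurd h.symm (fun h => pvAneB h.symm)
        · exact h
      have : List.replicate j pvB ++ pvB :: rv = List.replicate (j+1) pvB ++ rv := by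
        simp [List.replicate_succ']
      rw [pvBumpR, if_pos rfl, this, ih (j+1) hA']
    · rw [pvBumpR, if_neg hd]
      have h2 : ∀ (k : Nat), pvIncLE (List.replicate k pvB ++ d :: rv) =
          List.replicate k pvA ++ pvB :: rv := by
        intro k; induction k with
        | zero => simp [pvIncLE, hd]
        | succ k ihk => simp [List.replicate_succ, pvIncLE, ihk]
      rw [h2]; simp


theorem pvBitsR_zero (m : Nat) : pvBitsR m 0 = List.replicate m pvA := by
  induction m with
  | zero => rfl
  | succ m ih => simp [pvBitsR, ih, List.replicate_succ]

theorem pvBitsR_top (m : Nat) : pvBitsR m (2 ^ m - 1) = List.replicate m pvB := by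
  induction m with
  | zero => rfl
  | succ m ih =>
    have e : 2 ^ (m + 1) = 2 * 2 ^ m := by ring
    have h1 : (1:Nat) ≤ 2 ^ m := Nat.one_le_two_pow
    have hmod : (2 ^ (m + 1) - 1) % 2 = 1 := by omega
    have hdiv : (2 ^ (m + 1) - 1) / 2 = 2 ^ m - 1 := by omega
    simp [pvBitsR, hmod, hdiv, ih, List.replicate_succ]

theorem pvValR_lt_top (r : List (List String)) (h : pvOkR r)
    (hne : r ≠ List.replicate r.length pvB) : pvValR r < 2 ^ r.length - 1 := by
  have h1 := pvValR_lt r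
  rcases Nat.lt_or_ge (pvValR r) (2 ^ r.length - 1) with h2 | h2
  · exact h2
  · exfalso
    have e : pvValR r = 2 ^ r.length - 1 := by omega
    apply hne
    have := pvBitsR_valR r h
    rw [e, pvBitsR_top] at this
    exact this.symm

-- set at a Python negative index
theorem pvSetNeg {α : Type} (l : List α) (j : Nat) (v : α) (hj : j < l.length) :
    PySem.List.pySetD l (-((j:Int)+1)) v = l.set (l.length - (j+1)) v := by
  simp only [PySem.List.pySetD, PySem.List.pySet?, PySem.List.pyIdx?]
  rw [if_neg (by omega), if_pos (by omega)]
  have e : (-(-((j:Int)+1))).toNat = j + 1 := by omega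
  simp

theorem pvGetNeg {α : Type} (u : List α) (d : α) (t : List α) (j : Nat)
    (hj : t.length = j) (dflt : α) :
    PySem.List.pyGetD (u ++ d :: t) (-((j:Int)+1)) dflt = d := by
  have hlen : (u ++ d :: t).length = u.length + j + 1 := by
    rw [List.length_append, List.length_cons, hj]; omega
  have e : -((j:Int)+1) = -(((j+1 : Nat)):Int) := by push_cast; ring
  rw [e, PySem.List.pyGetD_neg_natCast _ _ _ (by omega) (by omega)]
  have h2 : (u ++ d :: t)[(u ++ d :: t).length - (j+1)]? = some d := by
    rw [show (u ++ d :: t).length - (j+1) = u.length by omega]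
    rw [List.getElem?_append_right (le_refl _)]
    simp
  have h3 := List.getElem?_eq_getElem (l := u ++ d :: t)
    (i := (u ++ d :: t).length - (j+1)) (by omega)
  exact Option.some_inj.mp (h3.symm.trans h2)

theorem pvSetNeg' {α : Type} (u : List α) (d : α) (t : List α) (j : Nat)
    (hj : t.length = j) (v : α) :
    PySem.List.pySetD (u ++ d :: t) (-((j:Int)+1)) v = u ++ v :: t := by
  have hlen : (u ++ d :: t).length = u.length + j + 1 := by
    rw [List.length_append, List.length_cons, hj]; omega
  rw [pvSetNeg _ j v (by omega)]
  rw [show (u ++ d :: t).length - (j+1) = u.length by omega]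
  rw [List.set_append_right _ _ (le_refl u.length)]
  simp

-- ===== inner loop =====
theorem pvShiftInner_spec (u : List (List String)) (d : List String) (j : Nat) (fuel : Nat)
    (hfuel : u.length + 1 ≤ fuel) (hu : pvOkR u) (hd : d = pvA ∨ d = pvB)
    (hA : d = pvA ∨ pvA ∈ u) :
    pvShiftInner pvArr fuel (u ++ d :: List.replicate j pvA) (-((j:Int)+1)) =
      pvBumpR (d :: u.reverse) j := by
  induction fuel generalizing u d j with
  | zero => omega
  | succ f ih =>
    have hlenr : (List.replicate j pvA).length = j := by simp
    have hget : PySem.List.pyGetD (u ++ d :: List.replicate j pvA) (-((j:Int)+1)) [] = d :=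
      pvGetNeg u d _ j hlenr []
    have hlast : PySem.List.pyGetD pvArr (-1) [] = pvB := by decide
    rcases hd with hd | hd
    · subst hd
      rw [pvShiftInner, hget, hlast, if_pos pvAneB]
      have hval : PySem.List.pyGetD pvArr
          ((((PySem.List.index? pvArr pvA).getD 0 + 1 : Nat) : Int)) [] = pvB := by decide
      rw [hval, pvSetNeg' u pvA _ j hlenr pvB]
      rw [pvBumpR, if_neg pvAneB, List.reverse_reverse]
    · subst hd
      rw [pvShiftInner, hget, hlast, if_neg (by simp)]
      have hfirst : PySem.List.pyGetD pvArr 0 [] = pvA := by decide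
      rw [hfirst, pvSetNeg' u pvB _ j hlenr pvA]
      -- u is nonempty since pvA ∈ u
      have hune : u ≠ [] := by
        rintro rfl
        rcases hA with h | h
        · exact pvAneB h.symm
        · simp at h
      obtain ⟨u', d', hu0⟩ := (List.eq_nil_or_concat u).resolve_left hune
      have hu0' : u = u' ++ [d'] := by rw [hu0, List.concat_eq_append]
      subst hu0'
      have e1 : u' ++ [d'] ++ pvA :: List.replicate j pvA
          = u' ++ d' :: List.replicate (j+1) pvA := by
        simp [List.replicate_succ]
      have e2 : -((j:Int)+1) - 1 = -(((j+1:Nat):Int)+1) := by push_cast; ring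
      rw [e1, e2]
      have hu' : pvOkR u' := fun x hx => hu x (by simp [hx])
      have hd' : d' = pvA ∨ d' = pvB := hu d' (by simp)
      have hA' : d' = pvA ∨ pvA ∈ u' := by
        rcases hA with h | h
        · exact absurd h.symm pvAneB
        · rcases List.mem_append.mp h with h | h
          · exact Or.inr h
          · have h5 : pvA = d' := by simpa using h
            exact Or.inl h5.symm
      have hf : u'.length + 1 ≤ f := by
        rw [List.length_append, List.length_cons] at hfuel; simp at hfuel; omega
      rw [ih u' d' (j+1) hf hu' hd' hA']
      have eR : pvBumpR (pvB :: (u' ++ [d']).reverse) j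
          = pvBumpR ((u' ++ [d']).reverse) (j+1) := by
        simp [pvBumpR]
      rw [eR]
      congr 1
      simp

-- ===== outer loop =====
theorem pvShiftOuter_spec (m : Nat) (n : Int) (hm : m = n.toNat) :
    ∀ (fuel : Nat) (r : List (List String)) (rez : List (List (List String))),
    pvOkR r → r.length = m → 2 ^ m - 1 - pvValR r ≤ fuel →
    pvShiftOuter pvArr n fuel r.reverse rez =
      rez ++ (List.range' (pvValR r + 1) (2 ^ m - 1 - pvValR r)).map
        (fun k => (pvBitsR m k).reverse) := by
  intro fuel
  induction fuel with
  | zero =>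
    intro r rez hok hlen hfuel
    by_cases hrepl : r = List.replicate m pvB
    · rw [pvShiftOuter, hrepl, pvValR_repl]
      have h1 : (1:Nat) ≤ 2 ^ m := Nat.one_le_two_pow
      rw [show 2 ^ m - 1 - (2 ^ m - 1) = 0 by omega]
      simp
    · exfalso
      have := pvValR_lt_top r hok (by rw [hlen]; exact hrepl)
      rw [hlen] at this; omega
  | succ f ih =>
    intro r rez hok hlen hfuel
    have hlast : PySem.List.pyGetD pvArr (-1) [] = pvB := by decide
    have hrep : PySem.List.pyRepeat [pvB] n = List.replicate m pvB := by
      rw [PySem.List.pyRepeat_singleton, hm]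
    by_cases hrepl : r = List.replicate m pvB
    · rw [pvShiftOuter, hlast, hrep, if_pos (by rw [hrepl, List.reverse_replicate])]
      rw [hrepl, pvValR_repl]
      have h1 : (1:Nat) ≤ 2 ^ m := Nat.one_le_two_pow
      rw [show 2 ^ m - 1 - (2 ^ m - 1) = 0 by omega]
      simp
    · have hvlt : pvValR r < 2 ^ m - 1 := by
        have := pvValR_lt_top r hok (by rw [hlen]; exact hrepl)
        rw [hlen] at this; exact this
      have hmemA : pvA ∈ r := (pvOkR_ne_repl_iff r hok).mp (by rw [hlen]; exact hrepl)
      rw [pvShiftOuter, hlast, hrep, if_neg (by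
        intro hc
        apply hrepl
        have := congrArg List.reverse hc
        rw [List.reverse_reverse, List.reverse_replicate] at this
        exact this)]
      -- evaluate the inner loop
      rcases r with _ | ⟨d, t⟩
      · exact absurd rfl (by rw [List.length_nil] at hlen; rw [← hlen] at hrepl; exact hrepl)
      · have hd : d = pvA ∨ d = pvB := hok d (by simp)
        have ht : pvOkR t.reverse := fun x hx => hok x (by simp at hx; simp [hx])
        have hA' : d = pvA ∨ pvA ∈ t.reverse := by
          rcases List.mem_cons.mp hmemA with h | h
          · exact Or.inl h.symm
          · exact Or.inr (List.mem_reverse.mpr h)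
        have edec : (d :: t).reverse = t.reverse ++ d :: List.replicate 0 pvA := by simp
        have efuel : t.reverse.length + 1 ≤ (d :: t).reverse.length + 1 := by simp
        have einner : pvShiftInner pvArr ((d :: t).reverse.length + 1) ((d :: t).reverse) (-1)
            = pvBumpR (d :: t) 0 := by
          rw [edec, show (-1 : Int) = -(((0:Nat):Int)+1) by norm_num]
          rw [pvShiftInner_spec t.reverse d 0 _ (by simp) ht hd hA']
          rw [List.reverse_reverse]
        rw [einner]
        have hbump : (pvBumpR (d :: t) 0).reverse = pvIncLE (d :: t) := by
          have := pvBumpR_incLE (d :: t) 0 hmemA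
          simpa using this
        obtain ⟨hv1, hv2, hv3⟩ := pvIncLE_spec (d :: t) hok (by rw [hlen]; exact hrepl)
        have hcrev : pvBumpR (d :: t) 0 = (pvIncLE (d :: t)).reverse := by
          rw [← hbump, List.reverse_reverse]
        rw [hcrev]
        have hstep := ih (pvIncLE (d :: t)) (rez ++ [(pvIncLE (d :: t)).reverse]) hv3
          (by rw [hv2]; exact hlen) (by omega)
        rw [hstep, hv1]
        have hbits : pvBitsR m (pvValR (d :: t) + 1) = pvIncLE (d :: t) := by
          have := pvBitsR_valR (pvIncLE (d :: t)) hv3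
          rw [hv1, hv2, hlen] at this
          exact this
        obtain ⟨K, hK⟩ : ∃ K, 2 ^ m - 1 - pvValR (d :: t) = K + 1 :=
          ⟨2 ^ m - 2 - pvValR (d :: t), by omega⟩
        rw [hK, List.range'_succ, show 2 ^ m - 1 - (pvValR (d :: t) + 1) = K by omega]
        simp [hbits, List.append_assoc]
  

theorem pvShift_spec (n : Int) :
    pvShift n pvArr = (List.range (2 ^ n.toNat)).map (fun k => (pvBitsR n.toNat k).reverse) := by
  have hfirst : PySem.List.pyGetD pvArr 0 [] = pvA := by decide
  rw [pvShift]
  simp only [hfirst, PySem.List.pyRepeat_singleton]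
  have hrev : List.replicate n.toNat pvA = (List.replicate n.toNat pvA).reverse := by
    rw [List.reverse_replicate]
  rw [show pvShiftOuter pvArr n (2 ^ n.toNat) (List.replicate n.toNat pvA) [List.replicate n.toNat pvA]
      = pvShiftOuter pvArr n (2 ^ n.toNat) (List.replicate n.toNat pvA).reverse [List.replicate n.toNat pvA]
    by rw [← hrev]]
  have hfuel : 2 ^ n.toNat - 1 - pvValR (List.replicate n.toNat pvA) ≤ 2 ^ n.toNat := by
    rw [pvValR_replA]; simp
  have hmain := pvShiftOuter_spec n.toNat n rfl (2 ^ n.toNat) (List.replicate n.toNat pvA)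
    [List.replicate n.toNat pvA]
    (by intro x hx; rw [List.eq_of_mem_replicate hx]; exact Or.inl rfl)
    (by simp) hfuel
  rw [hmain, pvValR_replA]
  have h1 : (1:Nat) ≤ 2 ^ n.toNat := Nat.one_le_two_pow
  obtain ⟨K, hK⟩ : ∃ K, 2 ^ n.toNat = K + 1 := ⟨2 ^ n.toNat - 1, by omega⟩
  rw [List.range_eq_range', hK, List.range'_succ]
  simp [pvBitsR_zero, List.reverse_replicate]

-- ===== bits ↔ vlist =====
theorem pvBitsR_low (m k : Nat) (hk : k < 2 ^ m) :
    pvBitsR (m+1) k = pvBitsR m k ++ [pvA] := by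
  induction m generalizing k with
  | zero => interval_cases k; rfl
  | succ m ih =>
    have h2 : k / 2 < 2 ^ m := by
      have : 2 ^ (m + 1) = 2 * 2 ^ m := by ring
      omega
    have eL : pvBitsR (m+1+1) k = (if k % 2 = 1 then pvB else pvA) :: pvBitsR (m+1) (k/2) := rfl
    have eR : pvBitsR (m+1) k = (if k % 2 = 1 then pvB else pvA) :: pvBitsR m (k/2) := rfl
    rw [eL, eR, ih _ h2, List.cons_append]

theorem pvBitsR_high (m k : Nat) (h1 : 2 ^ m ≤ k) (h2 : k < 2 ^ (m+1)) :
    pvBitsR (m+1) k = pvBitsR m (k - 2 ^ m) ++ [pvB] := by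
  induction m generalizing k with
  | zero => interval_cases k; rfl
  | succ m ih =>
    have e1 : 2 ^ (m + 2) = 2 * 2 ^ (m + 1) := by ring
    have e2 : 2 ^ (m + 1) = 2 * 2 ^ m := by ring
    have h3 : 2 ^ m ≤ k / 2 := by omega
    have h4 : k / 2 < 2 ^ (m + 1) := by omega
    have h5 : (k - 2 ^ (m + 1)) % 2 = k % 2 := by omega
    have h6 : (k - 2 ^ (m + 1)) / 2 = k / 2 - 2 ^ m := by omega
    have eL : pvBitsR (m+1+1) k = (if k % 2 = 1 then pvB else pvA) :: pvBitsR (m+1) (k/2) := rfl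
    have eR : pvBitsR (m+1) (k - 2^(m+1))
        = (if (k - 2^(m+1)) % 2 = 1 then pvB else pvA) :: pvBitsR m ((k - 2^(m+1))/2) := rfl
    rw [eL, eR, ih _ h3 h4, h5, h6, List.cons_append]

theorem pvRange_bits_vlist (m : Nat) :
    (List.range (2 ^ m)).map (fun k => (pvBitsR m k).reverse) =
      (pvVlist m).map (List.map pvDig) := by
  induction m with
  | zero => rfl
  | succ m ih =>
    have e : 2 ^ (m+1) = 2 ^ m + 2 ^ m := by ring
    rw [e, List.range_add, List.map_append, List.map_map]
    have hlow : (List.range (2 ^ m)).map (fun k => (pvBitsR (m+1) k).reverse)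
        = ((pvVlist m).map (List.map pvDig)).map (fun x => pvA :: x) := by
      rw [← ih, List.map_map]
      apply List.map_congr_left
      intro k hk
      rw [List.mem_range] at hk
      simp [pvBitsR_low m k hk]
    have hhigh : (List.range (2 ^ m)).map
          ((fun k => (pvBitsR (m+1) k).reverse) ∘ (fun x => 2 ^ m + x))
        = ((pvVlist m).map (List.map pvDig)).map (fun x => pvB :: x) := by
      rw [← ih, List.map_map]
      apply List.map_congr_left
      intro k hk
      rw [List.mem_range] at hk
      have h1 : 2 ^ m ≤ 2 ^ m + k := by omega
      have h2 : 2 ^ m + k < 2 ^ (m+1) := by omega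
      simp [Function.comp, pvBitsR_high m (2 ^ m + k) h1 h2]
    rw [hlow, hhigh]
    show _ = ((pvVlist m).map (false :: ·) ++ (pvVlist m).map (true :: ·)).map (List.map pvDig)
    rw [List.map_append, List.map_map, List.map_map, List.map_map, List.map_map]
    rfl

-- ===== vlist structure =====
theorem pvVlist_eq_front (m : Nat) :
    pvVlist m = pvFront m ++ [List.replicate m true] := by
  induction m with
  | zero => rfl
  | succ m ih =>
    show (pvVlist m).map (false :: ·) ++ (pvVlist m).map (true :: ·)
      = ((pvVlist m).map (false :: ·) ++ (pvFront m).map (true :: ·))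
          ++ [List.replicate (m+1) true]
    rw [ih]
    simp [List.replicate_succ, List.append_assoc]

theorem pvVlist_length (m : Nat) (p : List Bool) (hp : p ∈ pvVlist m) : p.length = m := by
  induction m generalizing p with
  | zero => simp [pvVlist] at hp; simp [hp]
  | succ m ih =>
    rcases List.mem_append.mp hp with h | h <;>
      obtain ⟨q, hq, rfl⟩ := List.mem_map.mp h <;> simp [ih q hq]

theorem pvFront_mem (m : Nat) (p : List Bool) (hp : p ∈ pvFront m) :
    p.length = m ∧ false ∈ p := by
  induction m generalizing p with
  | zero => simp [pvFront] at hp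
  | succ m ih =>
    rcases List.mem_append.mp hp with h | h
    · obtain ⟨q, hq, rfl⟩ := List.mem_map.mp h
      simp [pvVlist_length m q hq]
    · obtain ⟨q, hq, rfl⟩ := List.mem_map.mp h
      obtain ⟨h1, h2⟩ := ih q hq
      simp [h1, h2]

-- ===== split =====
theorem pvSplitOn_go (l : List Char) : ∀ (fuel : Nat) (cur : List Char) (acc : List (List Char)),
    l.length ≤ fuel →
    PySem.Chars.splitOn.go [','] fuel l cur acc = acc.reverse ++ pvPieces cur.reverse l := by
  induction l with
  | nil =>
    intro fuel cur acc _
    cases fuel <;> simp [PySem.Chars.splitOn.go, pvPieces]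
  | cons c rest ih =>
    intro fuel cur acc hfuel
    cases fuel with
    | zero => simp at hfuel
    | succ f =>
      rw [PySem.Chars.splitOn.go]
      by_cases hc : c = ','
      · subst hc
        rw [if_pos (by simp [List.isPrefixOf])]
        rw [show List.drop ([','] : List Char).length (',' :: rest) = rest from rfl]
        rw [ih f [] (cur.reverse :: acc) (by simp at hfuel ⊢; omega)]
        simp [pvPieces]
      · rw [if_neg (by simp [List.isPrefixOf]; exact fun h => absurd h.symm hc)]
        rw [ih f (c :: cur) acc (by simp at hfuel ⊢; omega)]
        simp [pvPieces, hc]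

theorem pvSplitOn_eq (l : List Char) : PySem.Chars.splitOn l [','] = pvPieces [] l := by
  rw [PySem.Chars.splitOn, pvSplitOn_go l (l.length + 1) [] [] (by omega)]
  simp

-- ===== per-variant =====
theorem pvJoin_inter (cs : List Char) (p : List Bool)
    (h0 : cs = [] → p = []) (h1 : cs ≠ [] → p.length + 1 = cs.length) :
    (List.map String.toList
      (((cs.map fun ch => [String.ofList [ch]]).zip (p.map pvDig ++ [[]])).flatMap
        (fun el => el.1 ++ el.2))).flatten = pvInter cs p := by
  induction cs generalizing p with
  | nil => rw [h0 rfl]; rfl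
  | cons c rest ih =>
    cases rest with
    | nil =>
      have hp : p = [] := by
        have := h1 (by simp)
        cases p with
        | nil => rfl
        | cons q p' => simp at this
      subst hp
      simp [pvInter]
    | cons c2 rest2 =>
      obtain ⟨q, p', rfl⟩ : ∃ q p', p = q :: p' := by
        have := h1 (by simp)
        cases p with
        | nil => simp at this
        | cons q p' => exact ⟨q, p', rfl⟩
      have hrec := ih p' (by intro h; simp at h)
        (by intro _; have := h1 (by simp); simp at this ⊢; omega)
      rw [show (List.map (fun ch => [String.ofList [ch]]) (c :: c2 :: rest2))
          = [String.ofList [c]] :: List.map (fun ch => [String.ofList [ch]]) (c2 :: rest2) from rfl]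
      rw [show List.map pvDig (q :: p') ++ [[]] = pvDig q :: (List.map pvDig p' ++ [[]]) from rfl]
      rw [List.zip_cons_cons, List.flatMap_cons, List.map_append, List.flatten_append, hrec]
      cases q <;> simp [pvDig, pvInter]

theorem pvBuildC_pieces (cs : List Char) (p : List Bool) (cur : List Char)
    (hcs : ',' ∉ cs) (hcur : ',' ∉ cur) :
    pvBuildC cs p cur = (pvPieces cur (pvInter cs p)).map String.ofList := by
  induction cs generalizing p cur with
  | nil => simp [pvBuildC, pvInter, pvPieces]
  | cons c rest ih =>
    have hc : c ≠ ',' := fun h => hcs (by simp [h])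
    have hcs' : ',' ∉ rest := fun h => hcs (by simp [h])
    cases p with
    | nil =>
      show pvBuildC rest [] (cur ++ [c]) = (pvPieces cur (c :: pvInter rest [])).map _
      rw [pvPieces, if_neg hc, ih [] (cur ++ [c]) hcs' (by
        intro h; rcases List.mem_append.mp h with h | h
        · exact hcur h
        · simp at h; exact hc h.symm)]
    | cons q p' =>
      have hcur' : ',' ∉ cur ++ [c] := by
        intro h; rcases List.mem_append.mp h with h | h
        · exact hcur h
        · simp at h; exact hc h.symm
      cases q with
      | true =>
        show pvBuildC rest p' (cur ++ [c])
            = (pvPieces cur (c :: ([] ++ pvInter rest p'))).map _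
        rw [List.nil_append, pvPieces, if_neg hc, ih p' (cur ++ [c]) hcs' hcur']
      | false =>
        show String.ofList (cur ++ [c]) :: pvBuildC rest p' []
            = (pvPieces cur (c :: ([','] ++ pvInter rest p'))).map _
        rw [pvPieces, if_neg hc]
        show _ = (pvPieces (cur ++ [c]) (',' :: pvInter rest p')).map _
        rw [pvPieces, if_pos rfl, List.map_cons, ih p' [] hcs' (by simp)]

theorem pvBuildC_all_true (cs : List Char) (p : List Bool) (cur : List Char)
    (hp : p.all id = true) : pvBuildC cs p cur = [String.ofList (cur ++ cs)] := by
  induction cs generalizing p cur with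
  | nil => simp [pvBuildC]
  | cons c rest ih =>
    cases p with
    | nil =>
      show pvBuildC rest [] (cur ++ [c]) = _
      rw [ih [] (cur ++ [c]) rfl]
      simp
    | cons q p' =>
      have hq : q = true := by simp at hp; exact hp.1
      have hp' : p'.all id = true := by simp at hp; simp [hp.2]
      subst hq
      show pvBuildC rest p' (cur ++ [c]) = _
      rw [ih p' (cur ++ [c]) hp']
      simp

theorem pvBuildC_length (cs : List Char) (p : List Bool) (cur : List Char)
    (hp : p.length < cs.length) :
    (pvBuildC cs p cur).length = p.count false + 1 := by
  induction cs generalizing p cur with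
  | nil => simp at hp
  | cons c rest ih =>
    cases p with
    | nil => simp [pvBuildC_all_true rest [] (cur ++ [c]) rfl, pvBuildC]
    | cons q p' =>
      have hp' : p'.length < rest.length := by simp at hp; omega
      cases q with
      | true =>
        show (pvBuildC rest p' (cur ++ [c])).length = _
        rw [ih p' (cur ++ [c]) hp']
        simp
      | false =>
        show (String.ofList (cur ++ [c]) :: pvBuildC rest p' []).length = _
        rw [List.length_cons, ih p' [] hp']
        simp

-- ===== B structure =====
theorem pvGoB_spec (cs : List Char) (cur : List Char) (groups : List String) :
    pvGoB cs cur groups = (pvVlist (cs.length - 1)).filterMap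
      (fun p => if groups.isEmpty && p.all id then none
                else some (groups ++ pvBuildC cs p cur)) := by
  induction cs generalizing cur groups with
  | nil =>
    show (if groups.isEmpty then [] else [groups ++ [String.ofList cur]]) = _
    cases hg : groups.isEmpty <;> simp [pvVlist, pvBuildC]
  | cons c rest ih =>
    cases rest with
    | nil =>
      show pvGoB [] (cur ++ [c]) groups = _
      rw [pvGoB]
      cases hg : groups.isEmpty <;> simp [pvVlist, pvBuildC]
    | cons c2 rest2 =>
      show (pvGoB (c2 :: rest2) [] (groups ++ [String.ofList (cur ++ [c])])
              ++ pvGoB (c2 :: rest2) (cur ++ [c]) groups) = _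
      rw [ih [] (groups ++ [String.ofList (cur ++ [c])]), ih (cur ++ [c]) groups]
      show _ = ((pvVlist ((c2 :: rest2).length - 1)).map (false :: ·)
          ++ (pvVlist ((c2 :: rest2).length - 1)).map (true :: ·)).filterMap _
      rw [List.filterMap_append, List.filterMap_map, List.filterMap_map]
      congr 1
      · apply List.filterMap_congr
        intro p _
        simp only [Function.comp]
        show _ = if groups.isEmpty && (false :: p).all id then none
          else some (groups ++ pvBuildC (c :: c2 :: rest2) (false :: p) cur)
        rw [show ((false :: p).all id) = false by simp, Bool.and_false, if_neg (by simp)]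
        rw [if_neg (by simp)]
        simp [pvBuildC, List.append_assoc]

-- ===== remove =====
theorem pvRemove_last {α : Type} [BEq α] [LawfulBEq α] (l : List α) (x : α) (hx : x ∉ l) :
    PySem.List.remove? (l ++ [x]) x = some l := by
  induction l with
  | nil => simp [PySem.List.remove?_cons_self]
  | cons a l ih =>
    have ha : a ≠ x := fun h => hx (by simp [h])
    rw [List.cons_append, PySem.List.remove?_cons_of_ne _ ha,
      ih (fun h => hx (by simp [h]))]
    rfl

theorem pvJoin_nil (parts : List (List Char)) : PySem.Chars.join [] parts = parts.flatten := by
  simp only [PySem.Chars.join, List.intercalate]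
  induction parts with
  | nil => rfl
  | cons a l ih => cases l <;> simp_all [List.intersperse]

-- A's per-variant computation equals B's group list
theorem pvRenderA (cs : List Char) (p : List Bool) (hpre : ',' ∉ cs)
    (h0 : cs = [] → p = []) (h1 : cs ≠ [] → p.length + 1 = cs.length) :
    (PySem.Str.split? (PySem.Str.join ""
        (((cs.map (fun ch => [String.ofList [ch]])).zip (List.map pvDig p ++ [[]])).foldl
          (fun sub el => sub ++ el.1 ++ el.2) [])) ",").getD []
      = pvBuildC cs p [] := by
  have hbody : (fun (sub : List String) (el : List String × List String) => sub ++ el.1 ++ el.2)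
      = fun sub el => sub ++ (el.1 ++ el.2) := by
    funext sub el; rw [List.append_assoc]
  rw [hbody, PySem.List.foldl_append_eq_flatMap, List.nil_append]
  simp only [PySem.Str.join, PySem.Str.split?]
  rw [show (("" : String).toList : List Char) = [] from rfl,
    show (("," : String).toList : List Char) = [','] from rfl]
  rw [String.toList_ofList, pvJoin_nil, pvJoin_inter cs p h0 h1]
  rw [show PySem.Chars.split? (pvInter cs p) [',']
      = some (PySem.Chars.splitOn (pvInter cs p) [',']) from rfl]
  rw [pvSplitOn_eq]
  rw [pvBuildC_pieces cs p [] hpre (by simp)]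
  rfl

theorem pvFilterMap_no_none {α β : Type} (l : List α) (g : α → Bool) (f : α → β)
    (h : ∀ x ∈ l, g x = false) :
    l.filterMap (fun x => if g x then none else some (f x)) = l.map f := by
  induction l with
  | nil => rfl
  | cons a l ih =>
    rw [List.filterMap_cons, h a (by simp), ih (fun x hx => h x (by simp [hx]))]
    rfl

theorem pvReplicate_all_true (m : Nat) : (List.replicate m true).all id = true := by
  simp

-- the group list of the all-true (no-comma) pattern is the whole string
theorem pvBuildC_top (cs : List Char) (m : Nat) :
    pvBuildC cs (List.replicate m true) [] = [String.ofList cs] := by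
  rw [pvBuildC_all_true cs _ [] (pvReplicate_all_true m)]
  rfl

-- every front-pattern group list has at least two groups
theorem pvFront_ne (cs : List Char) (m : Nat) (hm : m = cs.length - 1) (y : List String)
    (hy : y ∈ (pvFront m).map (fun p => pvBuildC cs p [])) : y.length ≥ 2 := by
  obtain ⟨p, hp, rfl⟩ := List.mem_map.mp hy
  obtain ⟨hplen, hpf⟩ := pvFront_mem m p hp
  have hpne : p ≠ [] := fun h => by subst h; simp at hpf
  have hm1 : 1 ≤ m := by
    rcases p with _ | ⟨q, p'⟩
    · exact absurd rfl hpne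
    · simp at hplen; omega
  have hlt : p.length < cs.length := by omega
  rw [pvBuildC_length cs p [] hlt]
  have := List.count_pos_iff.mpr hpf
  omega

-- ===== VERDICT (by name: the statement is the Claim_ definition above) =====
set_option maxHeartbeats 1000000 in
theorem comb_numb_spec : Claim_equal_comb_numb := by
  intro numb _ hpre
  unfold Spec_comb_numb
  have hm : (PySem.Str.len numb - 1).toNat = numb.toList.length - 1 := by
    simp only [PySem.Str.len]; omega
  simp only [comb_numb, comb_numb_alt]
  rw [show ([[","], []] : List (List String)) = pvArr from rfl]
  rw [pvShift_spec, hm, pvRange_bits_vlist]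
  rw [PySem.List.foldl_append_singleton_eq_map, List.nil_append, List.map_map]
  have hper : ∀ p ∈ pvVlist (numb.toList.length - 1),
      ((fun var =>
          (PySem.Str.split? (PySem.Str.join ""
            (((numb.toList.map (fun ch => [String.ofList [ch]])).zip (var ++ [[]])).foldl
              (fun sub el => sub ++ el.1 ++ el.2) [])) ",").getD []) ∘ List.map pvDig) p
        = pvBuildC numb.toList p [] := by
    intro p hp
    have hplen := pvVlist_length _ p hp
    simp only [Function.comp_apply]
    exact pvRenderA numb.toList p hpre
      (by intro h; rw [h] at hplen; simp at hplen; exact hplen)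
      (by intro h
          have h2 : numb.toList.length ≠ 0 := fun hh => h (List.length_eq_zero_iff.mp hh)
          omega)
  rw [List.map_congr_left hper]
  rw [pvVlist_eq_front, List.map_append, List.map_singleton, pvBuildC_top, String.ofList_toList]
  rw [pvRemove_last _ [numb] (by
    intro hmem
    have := pvFront_ne numb.toList (numb.toList.length - 1) rfl [numb] hmem
    simp at this)]
  rw [Option.getD_some]
  rw [pvGoB_spec, pvVlist_eq_front, List.filterMap_append]
  rw [show (fun (p : List Bool) => if (List.isEmpty ([] : List String) && p.all id) then none
        else some (([] : List String) ++ pvBuildC numb.toList p []))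
      = fun p => if p.all id then none else some (pvBuildC numb.toList p []) by
    funext p; simp]
  rw [pvFilterMap_no_none _ _ _ (fun p hp => by
    have hf := (pvFront_mem _ p hp).2
    rw [List.all_eq_false]
    exact ⟨false, hf, by simp⟩)]
  simp
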